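-- pv_equiv track=rewrite | github.com/dvlpr-elfic/SW-Training | Solution/Programmers/[1차] 비밀지도_v2.py | getStrCode
-- ===== SOURCE A (Python) =====
-- def getStrCode(code, n):
--     ret = ""
--     base = 1 << (n - 1)
--
--     for i in range(0, n):
--         and_value = code & base
--         base = base >> 1
--         if and_value == 0:
--             ret += " "
--         else:
--             ret += "#"
--
--     return ret
-- ===== SOURCE B (Python) =====
-- def getStrCode(code, n):
--     high = 1 << (n - 1)          # raises ValueError for n <= 0, like the original
--     mask = (high << 1) - 1
--     return format(code & mask, '0{}b'.format(n)).replace('0', ' ').replace('1', '#')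
-- ===== Notes on version B (the rewrite author's own statement) =====
-- stated objective: idiomatic
-- what changed: Replaces the explicit per-bit loop with a shifting mask by one masked binary formatting (format(code & mask, '0nb')) followed by character replacement; the mask is derived through 1<<(n-1) so the ValueError on n<=0 is preserved.
-- outside the precondition, e.g. on getStrCode(5, 0): A raises ValueError, B raises ValueError
import Mathlib
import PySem

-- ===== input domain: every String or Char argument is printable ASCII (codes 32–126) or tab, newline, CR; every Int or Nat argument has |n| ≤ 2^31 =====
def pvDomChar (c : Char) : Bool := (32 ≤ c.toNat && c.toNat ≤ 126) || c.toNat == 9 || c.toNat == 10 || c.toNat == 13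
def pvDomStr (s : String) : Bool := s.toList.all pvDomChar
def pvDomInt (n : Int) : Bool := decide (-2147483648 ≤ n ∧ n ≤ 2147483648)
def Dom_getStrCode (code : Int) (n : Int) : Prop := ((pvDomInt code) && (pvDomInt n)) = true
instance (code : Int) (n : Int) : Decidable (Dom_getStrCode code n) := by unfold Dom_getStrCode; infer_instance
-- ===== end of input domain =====

-- B replaces A's explicit per-bit loop by one masked binary formatting plus character replacement (idiomatic, same cost).

-- ===== PORT A =====
-- the loop body of A, step for step (and_value from the old base, then base >>= 1, then append)
def pvStepA (code : Int) (st : List Char × Int) (_ : Int) : List Char × Int :=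
  let and_value := PySem.Int.band code st.2
  let base := st.2 >>> (1 : Nat)
  if and_value = 0 then (st.1 ++ [' '], base) else (st.1 ++ ['#'], base)

def getStrCode (code : Int) (n : Int) : String :=
  -- base = 1 << (n - 1): Python raises ValueError when n - 1 < 0; those inputs are outside Pre_ (0 is junk)
  let base : Int := if 0 ≤ n - 1 then (1 : Int) <<< (n - 1).toNat else 0
  -- ret += " "/"#" is carried as a List Char and String.mk'd at the end (exact)
  let st := (PySem.List.pyRange 0 n 1).foldl (pvStepA code) ([], base)
  String.mk st.1

-- ===== PORT B =====
-- format(k, 'b') digit list: recursion k -> k/2 with the low digit appended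
def pvBin : Nat → List Char
  | 0 => ['0']
  | 1 => ['1']
  | k+2 => pvBin ((k+2)/2) ++ [if (k+2) % 2 = 0 then '0' else '1']

def getStrCode_alt (code : Int) (n : Int) : String :=
  -- high = 1 << (n - 1): raises ValueError for n ≤ 0 exactly like A (outside Pre_; 0 is junk)
  let high : Int := if 0 ≤ n - 1 then (1 : Int) <<< (n - 1).toNat else 0
  let mask : Int := (high <<< (1 : Nat)) - 1
  let masked : Int := PySem.Int.band code mask
  -- format(masked, '0{n}b'): binary digits left-padded with '0' to width n (masked ≥ 0 under Pre_, so toNat is exact)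
  let digits := List.replicate (n.toNat - (pvBin masked.toNat).length) '0' ++ pvBin masked.toNat
  -- .replace('0', ' ').replace('1', '#') on single-char patterns = two character maps (exact)
  String.mk ((digits.map (fun c => if c = '0' then ' ' else c)).map (fun c => if c = '1' then '#' else c))

-- ===== PRECONDITION & SPEC =====
-- Python A (and B) raises ValueError ("negative shift count") for n ≤ 0; nothing else raises.
def Pre_getStrCode (code : Int) (n : Int) : Prop := 1 ≤ n
instance (code : Int) (n : Int) : Decidable (Pre_getStrCode code n) := by unfold Pre_getStrCode; infer_instance
def pvWitness_getStrCode : Int × Int := (9, 5)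

def Spec_getStrCode (code : Int) (n : Int) (out : String) : Prop := out = getStrCode_alt code n
instance (code : Int) (n : Int) (out : String) : Decidable (Spec_getStrCode code n out) := by unfold Spec_getStrCode; infer_instance

-- ===== CLAIM (what is proved, stated in full; the proofs are below) =====
def Claim_equal_getStrCode : Prop := ∀ (code : Int) (n : Int), Dom_getStrCode code n → Pre_getStrCode code n → Spec_getStrCode code n (getStrCode code n)

-- ===== LEMMAS AND PROOFS =====

-- the low m bits of k, most significant first
def pvBits (k m : Nat) : List Bool := (List.range m).reverse.map k.testBit

theorem pvBits_high (k m : Nat) : pvBits k (m+1) = k.testBit m :: pvBits k m := by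
  simp [pvBits, List.range_succ]

theorem pvBits_low (k m : Nat) : pvBits k (m+1) = pvBits (k/2) m ++ [k.testBit 0] := by
  simp [pvBits, List.range_succ_eq_map, List.map_map, Function.comp_def, Nat.testBit_succ]

theorem pvTestBit_allOnes_sub : ∀ (m : Nat), ∀ x i, x < 2^m →
    (2^m - 1 - x).testBit i = (decide (i < m) && !x.testBit i) := by
  intro m
  induction m with
  | zero => intro x i hx; interval_cases x; simp
  | succ m ih =>
    intro x i hx
    have hq : x / 2 < 2^m := by omega
    have hkey : 2^(m+1) - 1 - x = 2 * (2^m - 1 - x/2) + (1 - x % 2) := by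
      have h2 : 2^(m+1) = 2*2^m := by ring
      omega
    cases i with
    | zero =>
      rw [hkey, Nat.testBit_zero, Nat.testBit_zero]
      have : x % 2 = 0 ∨ x % 2 = 1 := by omega
      rcases this with h | h <;> simp [h]
    | succ i =>
      rw [hkey, Nat.testBit_succ, Nat.testBit_succ]
      have hdiv : (2 * (2^m - 1 - x/2) + (1 - x % 2)) / 2 = 2^m - 1 - x/2 := by omega
      rw [hdiv, ih _ i hq]
      have : decide (i + 1 < m + 1) = decide (i < m) := by simp
      rw [this]

-- code & (2^m - 1) is code mod 2^m, also for negative code (Python's infinite two's complement)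
theorem pvBandMask (code : Int) (m : Nat) :
    PySem.Int.band code ((2:Int)^m - 1) = code % (2:Int)^m := by
  have hN : (((2^m : Nat) : Int)) = (2:Int)^m := by push_cast; ring
  have hN1 : (1:Nat) ≤ 2^m := Nat.one_le_two_pow
  have hM0 : (0:Int) ≤ (2:Int)^m - 1 := by omega
  by_cases hc : 0 ≤ code
  · rw [PySem.Int.band, if_pos hc, if_pos hM0]
    have h1 : ((2:Int)^m - 1).toNat = 2^m - 1 := by omega
    rw [h1, Nat.and_two_pow_sub_one_eq_mod, ← hN]
    conv_rhs => rw [← Int.toNat_of_nonneg hc]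
    exact (Int.natCast_emod code.toNat (2^m)).symm
  · rw [PySem.Int.band, if_neg hc, if_pos hM0]
    set t := (-code - 1).toNat with htdef
    have ht : (t:Int) = -code - 1 := Int.toNat_of_nonneg (by omega)
    have h1 : ((2:Int)^m - 1).toNat = 2^m - 1 := by omega
    rw [h1, Nat.and_comm, Nat.and_two_pow_sub_one_eq_mod]
    set r := t % 2^m with hrdef
    set q := t / 2^m with hqdef
    have hr : r < 2^m := Nat.mod_lt _ (by omega)
    have hqr : 2^m * q + r = t := Nat.div_add_mod t (2^m)
    have hcode : code = ((2:Int)^m - 1 - (r:Int)) + (2:Int)^m * (-(q:Int) - 1) := by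
      have h2 : ((2:Int)^m) * (q:Int) + (r:Int) = (t:Int) := by
        rw [← hN]; exact_mod_cast congrArg (Nat.cast : Nat → Int) hqr
      linear_combination ht + h2
    rw [hcode, Int.add_mul_emod_self_left,
      Int.emod_eq_of_lt (by omega) (by omega)]
    omega

-- code & 2^i == 0 reads bit i of code mod 2^m (i < m), also for negative code
theorem pvBandPow (code : Int) (m i : Nat) (hi : i < m) :
    (PySem.Int.band code ((2:Int)^i) = 0) ↔ (((code % (2:Int)^m).toNat).testBit i = false) := by
  have hN : (((2^m : Nat) : Int)) = (2:Int)^m := by push_cast; ring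
  have hN1 : (1:Nat) ≤ 2^m := Nat.one_le_two_pow
  have hi0 : (0:Int) ≤ (2:Int)^i := by positivity
  by_cases hc : 0 ≤ code
  · rw [PySem.Int.band, if_pos hc, if_pos hi0]
    have h1 : ((2:Int)^i).toNat = 2^i := by
      have : (((2^i : Nat) : Int)) = (2:Int)^i := by push_cast; ring
      omega
    rw [h1, Nat.and_two_pow]
    have hk : (code % (2:Int)^m).toNat = code.toNat % 2^m := by
      conv_lhs => rw [← Int.toNat_of_nonneg hc, ← hN, ← Int.natCast_emod]
      omega
    rw [hk, Nat.testBit_mod_two_pow]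
    simp only [hi, decide_true, Bool.true_and]
    have h2i : (0:Nat) < 2^i := Nat.two_pow_pos i
    cases h : code.toNat.testBit i <;> simp [h] <;> omega
  · rw [PySem.Int.band, if_neg hc, if_pos hi0]
    set t := (-code - 1).toNat with htdef
    have ht : (t:Int) = -code - 1 := Int.toNat_of_nonneg (by omega)
    have h1 : ((2:Int)^i).toNat = 2^i := by
      have : (((2^i : Nat) : Int)) = (2:Int)^i := by push_cast; ring
      omega
    -- code % 2^m = 2^m - 1 - t % 2^m  (from pvBandMask's computation)
    have hmask := pvBandMask code m
    rw [PySem.Int.band, if_neg hc, if_pos (by omega), ← htdef] at hmask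
    have h2 : ((2:Int)^m - 1).toNat = 2^m - 1 := by omega
    rw [h2, Nat.and_comm, Nat.and_two_pow_sub_one_eq_mod] at hmask
    have hk : (code % (2:Int)^m).toNat = 2^m - 1 - t % 2^m := by omega
    rw [hk, h1, Nat.and_comm, Nat.and_two_pow,
      pvTestBit_allOnes_sub m (t % 2^m) i (Nat.mod_lt _ (by omega)),
      Nat.testBit_mod_two_pow]
    have h2i : (1:Nat) ≤ 2^i := Nat.one_le_two_pow
    simp only [hi, decide_true, Bool.true_and]
    cases h : t.testBit i <;> simp [h] <;> omega

-- A's characters: bit i of code (as Python's code & 2^i) rendered '#'/' ', high bit first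
def pvCharsA (code : Int) (m : Nat) : List Char :=
  (List.range m).reverse.map (fun i => if PySem.Int.band code ((2:Int)^i) = 0 then ' ' else '#')

theorem pvCharsA_high (code : Int) (m : Nat) :
    pvCharsA code (m+1) =
      (if PySem.Int.band code ((2:Int)^m) = 0 then ' ' else '#') :: pvCharsA code m := by
  simp [pvCharsA, List.range_succ]

-- invariant of A's loop: t+1 steps with base 2^t render bits t..0, high bit first
theorem pvFoldA (code : Int) : ∀ (l : List Int) (acc : List Char) (t : Nat),
    l.length = t + 1 →
    (l.foldl (pvStepA code) (acc, (2:Int)^t)).1 = acc ++ pvCharsA code (t+1) := by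
  intro l
  induction l with
  | nil => intro acc t h; simp at h
  | cons x xs ih =>
    intro acc t h
    simp only [List.foldl_cons]
    have hstep : pvStepA code (acc, (2:Int)^t) x =
        ((acc ++ [if PySem.Int.band code ((2:Int)^t) = 0 then ' ' else '#']), (2:Int)^t >>> (1:Nat)) := by
      simp only [pvStepA]
      split <;> simp
    rw [hstep]
    cases t with
    | zero =>
      have hxs : xs = [] := by simpa using h
      subst hxs
      simp [pvCharsA]
    | succ s =>
      have hshift : ((2:Int)^(s+1)) >>> (1:Nat) = (2:Int)^s := by
        rw [Int.shiftRight_eq_div_pow, pow_succ]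
        simp
      rw [hshift, ih _ s (by simpa using h)]
      rw [pvCharsA_high code (s+1), pvCharsA_high code s]
      simp

theorem pvBin_two_le (k : Nat) (hk : 2 ≤ k) :
    pvBin k = pvBin (k/2) ++ [if k % 2 = 0 then '0' else '1'] := by
  obtain ⟨j, rfl⟩ : ∃ j, k = j + 2 := ⟨k - 2, by omega⟩
  simp [pvBin]

theorem pvBin_len : ∀ (m : Nat), 1 ≤ m → ∀ k, k < 2^m → (pvBin k).length ≤ m := by
  intro m
  induction m with
  | zero => omega
  | succ m ih =>
    intro _ k hk
    by_cases h2 : k ≤ 1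
    · interval_cases k <;> simp [pvBin]
    · rw [pvBin_two_le k (by omega)]
      have hm : 1 ≤ m := by
        by_contra hm
        have hm0 : m = 0 := by omega
        subst hm0; simp at hk; omega
      have hks : k / 2 < 2^m := by
        rw [Nat.pow_succ] at hk; omega
      have := ih hm (k/2) hks
      simp only [List.length_append, List.length_cons, List.length_nil]
      omega

-- binary digits of a number with exactly m+1 bits are its bits, high first
theorem pvBin_exact : ∀ (m : Nat), ∀ k, 2^m ≤ k → k < 2^(m+1) →
    pvBin k = (pvBits k (m+1)).map (fun b => if b then '1' else '0') := by
  intro m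
  induction m with
  | zero =>
    intro k h1 h2
    have : k = 1 := by omega
    subst this
    simp [pvBin, pvBits]
  | succ m ih =>
    intro k h1 h2
    have h2m : 2^(m+2) = 2*2^(m+1) := by ring
    have h2m' : 2^(m+1) = 2*2^m := by ring
    rw [pvBin_two_le k (by have := Nat.one_le_two_pow (n := m+1); omega)]
    rw [ih (k/2) (by omega) (by omega), pvBits_low k (m+1)]
    simp only [List.map_append, List.map_cons, List.map_nil]
    congr 1
    rw [Nat.testBit_zero]
    have : k % 2 = 0 ∨ k % 2 = 1 := by omega
    rcases this with h | h <;> simp [h]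

-- zero-padding the binary digits of k < 2^m to width m yields exactly the m bits of k
theorem pvPadBin : ∀ (m : Nat), 1 ≤ m → ∀ k, k < 2^m →
    List.replicate (m - (pvBin k).length) '0' ++ pvBin k
      = (pvBits k m).map (fun b => if b then '1' else '0') := by
  intro m
  induction m with
  | zero => omega
  | succ m ih =>
    intro _ k hk
    by_cases hm : m = 0
    · subst hm
      interval_cases k <;> simp [pvBin, pvBits]
    · have hm1 : 1 ≤ m := by omega
      by_cases hsmall : k < 2^m
      · have hlen := pvBin_len m hm1 k hsmall
        have hrep : (m + 1) - (pvBin k).length = ((m - (pvBin k).length) + 1) := by omega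
        rw [hrep, List.replicate_succ, pvBits_high]
        have hbit : k.testBit m = false := Nat.testBit_lt_two_pow hsmall
        simp only [hbit, List.map_cons, if_neg (by decide : ¬(false = true))]
        simp only [List.cons_append, ih hm1 k hsmall]
      · have hge : 2^m ≤ k := by omega
        have hx := pvBin_exact m k hge hk
        have hlen : (pvBin k).length = m + 1 := by
          rw [hx]; simp [pvBits]
        rw [hlen]
        simp [hx]

theorem pvMain (code n : Int) (hpre : 1 ≤ n) : getStrCode code n = getStrCode_alt code n := by
  set m := n.toNat with hmdef
  have hm : 1 ≤ m := by omega
  have hn : n = (m : Int) := by omega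
  have hN : (((2^m : Nat) : Int)) = (2:Int)^m := by push_cast; ring
  have hN1 : (1:Nat) ≤ 2^m := Nat.one_le_two_pow
  have hbase : (if 0 ≤ n - 1 then (1 : Int) <<< (n - 1).toNat else 0) = (2:Int)^(m-1) := by
    rw [if_pos (by omega), Int.shiftLeft_eq, one_mul]
    congr 1
    omega
  -- A side
  have hA : getStrCode code n = String.mk (pvCharsA code m) := by
    show String.mk ((PySem.List.pyRange 0 n 1).foldl (pvStepA code)
      ([], if 0 ≤ n - 1 then (1 : Int) <<< (n - 1).toNat else 0)).1 = _
    rw [hbase]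
    have hlen : (PySem.List.pyRange 0 n 1).length = (m - 1) + 1 := by
      rw [hn, PySem.List.pyRange_zero_natCast]
      simp
      omega
    have := pvFoldA code (PySem.List.pyRange 0 n 1) [] (m-1) hlen
    rw [Nat.sub_add_cancel hm] at this
    rw [this]
    simp
  -- B side
  have hmask : ((2:Int)^(m-1) <<< (1:Nat)) - 1 = (2:Int)^m - 1 := by
    rw [Int.shiftLeft_eq]
    have : (2:Int)^(m-1) * 2^1 = (2:Int)^m := by
      rw [pow_one, ← pow_succ, Nat.sub_add_cancel hm]
    rw [this]
  have hmasked : PySem.Int.band code ((2:Int)^m - 1) = code % (2:Int)^m := pvBandMask code m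
  set k := (code % (2:Int)^m).toNat with hkdef
  have hpos : (0:Int) < (2:Int)^m := by omega
  have hk2 : k < 2^m := by
    have h1 := Int.emod_lt_of_pos code hpos
    have h2 := Int.emod_nonneg code (by omega : (2:Int)^m ≠ 0)
    omega
  have hB : getStrCode_alt code n = String.mk
      ((((pvBits k m).map (fun b => if b then '1' else '0')).map
          (fun c => if c = '0' then ' ' else c)).map (fun c => if c = '1' then '#' else c)) := by
    show String.mk ((((List.replicate _ '0' ++ pvBin _).map
      (fun c => if c = '0' then ' ' else c)).map (fun c => if c = '1' then '#' else c)) ) = _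
    rw [hbase, hmask, hmasked, ← hkdef]
    have hnt : n.toNat = m := rfl
    rw [hnt, pvPadBin m hm k hk2]
  rw [hA, hB]
  congr 1
  simp only [List.map_map, pvCharsA, pvBits]
  apply List.map_congr_left
  intro i hi
  have him : i < m := by
    rw [List.mem_reverse, List.mem_range] at hi
    exact hi
  have hbp := pvBandPow code m i him
  by_cases hb : PySem.Int.band code ((2:Int)^i) = 0
  · have : k.testBit i = false := hbp.mp hb
    simp [hb, Function.comp, this]
  · have : k.testBit i = true := by
      cases h : k.testBit i
      · exact absurd (hbp.mpr h) hb
      · rfl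
    simp [hb, Function.comp, this]

-- ===== VERDICT (by name: the statement is the Claim_ definition above) =====
theorem getStrCode_spec : Claim_equal_getStrCode := by
  intro code n _ hpre
  exact pvMain code n hpre
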